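-- pv_equiv track=rewrite | github.com/madulinux/pdf-extraction-hitl | backend/core/extraction/rule_optimizer.py | _get_token_shape
-- ===== SOURCE A (Python) =====
-- def _get_token_shape(text: str) -> str:
--     """
--     Get token shape pattern
--     Examples:
--         "Jakarta" -> "Aa+"
--         "123" -> "9+"
--         "ABC-123" -> "A+-9+"
--     """
--     shape = []
--     prev_type = None
--
--     for char in text:
--         if char.isupper():
--             char_type = 'A'
--         elif char.islower():
--             char_type = 'a'
--         elif char.isdigit():
--             char_type = '9'
--         elif char.isspace():
--             char_type = ' '
--         else:
--             char_type = char  # Keep special chars as-is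
--
--         if char_type == prev_type and char_type in ['A', 'a', '9']:
--             if not shape[-1].endswith('+'):
--                 shape[-1] += '+'
--         else:
--             shape.append(char_type)
--             prev_type = char_type
--
--     return ''.join(shape)
-- ===== SOURCE B (Python) =====
-- from itertools import groupby
--
-- def _classify(c):
--     if c.isupper():
--         return 'A'
--     if c.islower():
--         return 'a'
--     if c.isdigit():
--         return '9'
--     if c.isspace():
--         return ' '
--     return c
--
-- def _get_token_shape(text: str) -> str:
--     pieces = []
--     for code, group in groupby(map(_classify, text)):
--         n = sum(1 for _ in group)
--         if code in ('A', 'a', '9'):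
--             pieces.append(code if n == 1 else code + '+')
--         else:
--             pieces.append(code * n)
--     return ''.join(pieces)
-- ===== Notes on version B (the rewrite author's own statement) =====
-- stated objective: idiomatic
-- what changed: Replaces the stateful prev_type/shape[-1]-mutating character loop by classifying all characters, grouping equal class codes with itertools.groupby, and emitting one piece per run (code or code+'+' for alphanumeric runs, code*n for other runs).
import Mathlib
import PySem

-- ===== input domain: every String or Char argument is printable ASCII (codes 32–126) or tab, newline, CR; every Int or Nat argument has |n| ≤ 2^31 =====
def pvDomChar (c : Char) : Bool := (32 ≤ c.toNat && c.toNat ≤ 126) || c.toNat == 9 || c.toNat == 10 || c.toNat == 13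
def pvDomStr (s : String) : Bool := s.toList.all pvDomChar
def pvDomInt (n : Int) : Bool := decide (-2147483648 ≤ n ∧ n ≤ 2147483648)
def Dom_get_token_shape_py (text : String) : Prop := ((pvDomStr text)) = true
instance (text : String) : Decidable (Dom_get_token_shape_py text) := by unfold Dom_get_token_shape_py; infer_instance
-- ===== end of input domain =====

-- B replaces A's stateful prev_type / mutate-last-element loop by classify-then-group-runs (itertools.groupby); objective: idiomatic (same O(n) algorithmic cost; a timing run measured a constant-factor speedup).

-- ===== PORT A =====
-- char.isupper()/islower()/isdigit()/isspace() chain; exact on the printable-ASCII + tab/newline/CR domain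
def pyClassify (c : Char) : String :=
  if 'A' ≤ c ∧ c ≤ 'Z' then "A"
  else if 'a' ≤ c ∧ c ≤ 'z' then "a"
  else if '0' ≤ c ∧ c ≤ '9' then "9"
  else if c = ' ' ∨ c = '\t' ∨ c = '\n' ∨ c = '\r' then " "
  else String.ofList [c]

-- the body of A's for-loop, after char_type has been computed
def aStepT : (List String × Option String) → String → (List String × Option String)
  | (shape, prev), t =>
    if prev = some t ∧ (t = "A" ∨ t = "a" ∨ t = "9") then
      match shape.getLast? with
      | some lastS =>
          if PySem.Str.endswith lastS "+" then (shape, prev)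
          else (shape.dropLast ++ [lastS ++ "+"], prev)
      | none => (shape, prev)   -- unreachable: prev = some t implies shape ≠ []
    else (shape ++ [t], some t)

def aStep (st : List String × Option String) (c : Char) : List String × Option String :=
  aStepT st (pyClassify c)

def get_token_shape_py (text : String) : String :=
  String.join (text.toList.foldl aStep ([], none)).1

-- ===== PORT B =====
-- itertools.groupby over the class codes: list of (code, run length)
def groupRuns : List String → List (String × Nat)
  | [] => []
  | t :: rest =>
      (t, (rest.takeWhile (· == t)).length + 1) :: groupRuns (rest.dropWhile (· == t))
termination_by l => l.length
decreasing_by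
  simpa [Nat.lt_succ_iff] using List.length_dropWhile_le (· == t) rest

def piece : String × Nat → String
  | (t, n) =>
    if t = "A" ∨ t = "a" ∨ t = "9" then (if n = 1 then t else t ++ "+")
    else String.join (List.replicate n t)   -- code * n

def get_token_shape_py_alt (text : String) : String :=
  String.join ((groupRuns (text.toList.map pyClassify)).map piece)

-- ===== PRECONDITION & SPEC =====
def Spec_get_token_shape_py (text : String) (out : String) : Prop := out = get_token_shape_py_alt text
instance (text : String) (out : String) : Decidable (Spec_get_token_shape_py text out) := by unfold Spec_get_token_shape_py; infer_instance

-- ===== CLAIM (what is proved, stated in full; the proofs are below) =====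
def Claim_equal_get_token_shape_py : Prop := ∀ (text : String), Dom_get_token_shape_py text → Spec_get_token_shape_py text (get_token_shape_py text)

-- ===== LEMMAS AND PROOFS =====

theorem join_foldl (init : String) (l : List String) :
    l.foldl (fun r s => r ++ s) init = init ++ l.foldl (fun r s => r ++ s) "" := by
  induction l generalizing init with
  | nil => simp
  | cons x xs ih => simp only [List.foldl]; rw [ih (init ++ x), ih ("" ++ x)]; simp [String.append_assoc]

theorem join_append (a b : List String) : String.join (a ++ b) = String.join a ++ String.join b := by
  simp only [String.join, List.foldl_append]; rw [join_foldl]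

theorem join_cons (a : String) (l : List String) : String.join (a :: l) = a ++ String.join l := by
  have h := join_append [a] l
  simpa [String.join] using h

theorem head_dropWhile {α : Type} (p : α → Bool) (l : List α) :
    ∀ h, (l.dropWhile p).head? = some h → p h = false := by
  induction l with
  | nil => simp
  | cons x xs ih =>
      intro h hh
      by_cases hx : p x
      · exact ih h (by simpa [List.dropWhile, hx] using hh)
      · simp [List.dropWhile, hx] at hh
        simpa [← hh] using hx

-- alnum run continuation once the '+' is already there
theorem foldl_after_plus (t : String) (ht : t = "A" ∨ t = "a" ∨ t = "9")
    (l : List String) (hl : ∀ x ∈ l, x = t) (shape : List String) :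
    l.foldl aStepT (shape ++ [t ++ "+"], some t) = (shape ++ [t ++ "+"], some t) := by
  induction l generalizing shape with
  | nil => rfl
  | cons x xs ih =>
      have hx : x = t := hl x (by simp)
      have hend : PySem.Chars.endswith (t.toList ++ ['+']) ['+'] = true := by
        rcases ht with h | h | h <;> subst h <;> decide
      have step : aStepT (shape ++ [t ++ "+"], some t) x = (shape ++ [t ++ "+"], some t) := by
        subst hx; simp [aStepT, ht, hend]
      rw [List.foldl_cons, step]
      exact ih (fun y hy => hl y (by simp [hy])) shape

-- alnum run: after the first character, the remaining run collapses into one '+'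
theorem foldl_from_single (t : String) (ht : t = "A" ∨ t = "a" ∨ t = "9")
    (l : List String) (hl : ∀ x ∈ l, x = t) (shape : List String) :
    l.foldl aStepT (shape ++ [t], some t)
      = (shape ++ [if l = [] then t else t ++ "+"], some t) := by
  cases l with
  | nil => rfl
  | cons x xs =>
      have hx : x = t := hl x (by simp)
      have hend : PySem.Chars.endswith t.toList ['+'] = false := by
        rcases ht with h | h | h <;> subst h <;> decide
      have step : aStepT (shape ++ [t], some t) x = (shape ++ [t ++ "+"], some t) := by
        subst hx; simp [aStepT, ht, hend]
      rw [List.foldl_cons, step]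
      simpa using foldl_after_plus t ht xs (fun y hy => hl y (by simp [hy])) shape

-- non-alnum run: every character is appended as its own string
theorem foldl_nonalnum (t : String) (ht : ¬ (t = "A" ∨ t = "a" ∨ t = "9"))
    (l : List String) (hl : ∀ x ∈ l, x = t) (shape : List String) (prev : Option String) :
    l.foldl aStepT (shape, prev) = (shape ++ l, if l = [] then prev else some t) := by
  induction l generalizing shape prev with
  | nil => simp
  | cons x xs ih =>
      have hx : x = t := hl x (by simp)
      have step : aStepT (shape, prev) x = (shape ++ [x], some x) := by
        subst hx; simp [aStepT, ht]
      rw [List.foldl_cons, step]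
      rw [ih (fun y hy => hl y (by simp [hy])) (shape ++ [x]) (some x)]
      subst hx
      by_cases hxs : xs = [] <;> simp [hxs]

theorem takeWhile_eq_replicate (t : String) (rest : List String) :
    rest.takeWhile (· == t) = List.replicate (rest.takeWhile (· == t)).length t := by
  apply List.eq_replicate_of_mem
  intro x hx
  have h := List.mem_takeWhile_imp hx
  exact eq_of_beq h

theorem main_lemma : ∀ (n : Nat) (cs : List String), cs.length ≤ n →
    ∀ (shape : List String) (prev : Option String),
    (∀ h, cs.head? = some h → prev ≠ some h) →
    String.join (cs.foldl aStepT (shape, prev)).1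
      = String.join shape ++ String.join ((groupRuns cs).map piece) := by
  intro n
  induction n with
  | zero =>
      intro cs hlen
      have : cs = [] := List.eq_nil_of_length_eq_zero (Nat.le_zero.mp hlen)
      subst this
      intro shape prev _
      simp [groupRuns, String.join]
  | succ n ih =>
      intro cs hlen shape prev hhead
      cases cs with
      | nil => simp [groupRuns, String.join]
      | cons t rest =>
          have hprev : prev ≠ some t := hhead t rfl
          have hdecomp : t :: rest = (t :: rest.takeWhile (· == t)) ++ rest.dropWhile (· == t) := by
            simp [List.takeWhile_append_dropWhile]
          have hrun : ∀ x ∈ rest.takeWhile (· == t), x = t := by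
            intro x hx
            have h := List.mem_takeWhile_imp hx
            exact eq_of_beq h
          -- first character always takes the else branch
          have step1 : aStepT (shape, prev) t = (shape ++ [t], some t) := by
            by_cases halnum : t = "A" ∨ t = "a" ∨ t = "9" <;> simp [aStepT, hprev]
          have htail_head : ∀ h, (rest.dropWhile (· == t)).head? = some h → (some t : Option String) ≠ some h := by
            intro h hh heq
            have := head_dropWhile (· == t) rest h hh
            simp at this
            exact this (by injection heq with e; exact e.symm)
          have htail_len : (rest.dropWhile (· == t)).length ≤ n := by
            have := List.length_dropWhile_le (· == t) rest
            have hr : rest.length ≤ n := by simpa using Nat.succ_le_succ_iff.mp hlen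
            omega
          conv_lhs => rw [hdecomp]
          rw [List.foldl_append, List.foldl_cons, step1]
          by_cases halnum : t = "A" ∨ t = "a" ∨ t = "9"
          · rw [foldl_from_single t halnum _ hrun shape]
            rw [ih _ htail_len _ _ htail_head]
            have hg : groupRuns (t :: rest)
                = (t, (rest.takeWhile (· == t)).length + 1) :: groupRuns (rest.dropWhile (· == t)) := by
              simp [groupRuns]
            have hpiece : piece (t, (rest.takeWhile (· == t)).length + 1)
                = if rest.takeWhile (· == t) = [] then t else t ++ "+" := by
              simp only [piece, halnum, if_true]
              by_cases he : rest.takeWhile (· == t) = [] <;> simp [he, List.length_eq_zero_iff]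
            rw [hg, List.map_cons, hpiece, join_cons, join_append]
            simp [String.join, String.append_assoc]
          · rw [foldl_nonalnum t halnum _ hrun (shape ++ [t]) (some t)]
            have hsome : (if rest.takeWhile (· == t) = [] then (some t : Option String) else some t) = some t := by
              by_cases he : rest.takeWhile (· == t) = [] <;> simp [he]
            rw [hsome, ih _ htail_len _ _ htail_head]
            have hg : groupRuns (t :: rest)
                = (t, (rest.takeWhile (· == t)).length + 1) :: groupRuns (rest.dropWhile (· == t)) := by
              simp [groupRuns]
            have hpiece : piece (t, (rest.takeWhile (· == t)).length + 1)
                = String.join (t :: rest.takeWhile (· == t)) := by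
              simp only [piece, halnum, if_false]
              rw [List.replicate_succ, ← takeWhile_eq_replicate t rest]
            rw [hg, List.map_cons, hpiece, join_cons, join_cons, join_append, join_append]
            simp [String.join, String.append_assoc]

-- ===== VERDICT (by name: the statement is the Claim_ definition above) =====
theorem get_token_shape_py_spec : Claim_equal_get_token_shape_py := by
  intro text _
  unfold Spec_get_token_shape_py get_token_shape_py get_token_shape_py_alt
  have : text.toList.foldl aStep ([], none) = (text.toList.map pyClassify).foldl aStepT ([], none) := by
    rw [List.foldl_map]; rfl
  rw [this]
  have := main_lemma (text.toList.map pyClassify).length _ le_rfl [] none (by simp)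
  rw [this]
  simp [String.join]
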